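-- pv_equiv track=rewrite | github.com/Roflkemper/chat-bot-v2 | services/telegram_alert_client.py | _parse_chat_ids
-- ===== SOURCE A (Python) =====
-- def _parse_chat_ids(raw: str) -> list[int]:
--     out: list[int] = []
--     seen: set[int] = set()
--     for part in str(raw or "").replace(";", ",").split(","):
--         part = part.strip()
--         if not part:
--             continue
--         try:
--             value = int(part)
--         except ValueError:
--             continue
--         if value in seen:
--             continue
--         seen.add(value)
--         out.append(value)
--     return out
-- ===== SOURCE B (Python) =====
-- def _parse_chat_ids(raw: str) -> list[int]:
--     # One character-level scan with a token buffer: flush on ',' or ';'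
--     # (a trailing sentinel ',' flushes the last token); no replace/split passes.
--     s = str(raw or "")
--     out: list[int] = []
--     buf = ""
--     for ch in s + ",":
--         if ch in ",;":
--             tok = buf.strip()
--             buf = ""
--             if tok:
--                 try:
--                     v = int(tok)
--                 except ValueError:
--                     continue
--                 if v not in out:
--                     out.append(v)
--         else:
--             buf += ch
--     return out
-- ===== Notes on version B (the rewrite author's own statement) =====
-- stated objective: alternative
-- what changed: Replaces A's replace-then-split-then-loop pipeline by a single character-level scanner: one pass over the characters with a token buffer flushed at each delimiter (sentinel comma flushes the last token), deduplicating by membership in the output list instead of a separate seen-set.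
import Mathlib
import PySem

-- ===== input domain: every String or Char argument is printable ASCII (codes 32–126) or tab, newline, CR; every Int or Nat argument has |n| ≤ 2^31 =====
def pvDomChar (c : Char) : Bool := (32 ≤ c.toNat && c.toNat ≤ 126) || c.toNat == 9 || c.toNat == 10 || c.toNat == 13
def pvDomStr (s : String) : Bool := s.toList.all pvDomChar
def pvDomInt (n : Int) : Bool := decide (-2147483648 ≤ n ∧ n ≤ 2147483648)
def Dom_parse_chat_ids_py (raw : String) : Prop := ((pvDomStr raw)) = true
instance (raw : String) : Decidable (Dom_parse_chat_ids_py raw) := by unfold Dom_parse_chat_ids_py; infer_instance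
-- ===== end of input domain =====

-- B replaces A's replace/split/loop pipeline with a single character-level scanner
-- (token buffer flushed at each delimiter, list-membership dedup); same return value.

-- ===== PORT A =====
-- 'str(raw or "")' is the identity on str arguments (str("") = ""), so the port works on raw directly.
def parse_chat_ids_py (raw : String) : List Int :=
  ((PySem.Chars.splitOn (PySem.Chars.replace raw.toList [';'] [',']) [',']).foldl
    (fun (st : List Int × PySem.Set Int) part =>
      let part := PySem.Chars.strip part
      if part = [] then st
      else
        match PySem.Int.ofChars? part with
        | none => st
        | some value =>
          if PySem.Set.contains st.2 value then st
          else (st.1 ++ [value], PySem.Set.add st.2 value))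
    ([], PySem.Set.empty)).1

-- ===== PORT B =====
-- B-side helper: the flush block of Source B's loop (runs when ch is ',' or ';').
def pvFlush (buf : List Char) (out : List Int) : List Int :=
  let tok := PySem.Chars.strip buf
  if tok = [] then out
  else
    match PySem.Int.ofChars? tok with
    | none => out
    | some v => if v ∈ out then out else out ++ [v]

def parse_chat_ids_py_alt (raw : String) : List Int :=
  ((raw.toList ++ [',']).foldl
    (fun (st : List Int × List Char) ch =>
      if ch = ',' ∨ ch = ';' then (pvFlush st.2 st.1, []) else (st.1, st.2 ++ [ch]))
    (([] : List Int), ([] : List Char))).1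

-- ===== PRECONDITION & SPEC =====
def Spec_parse_chat_ids_py (raw : String) (out : List Int) : Prop := out = parse_chat_ids_py_alt raw
instance (raw : String) (out : List Int) : Decidable (Spec_parse_chat_ids_py raw out) := by unfold Spec_parse_chat_ids_py; infer_instance

-- ===== CLAIM (what is proved, stated in full; the proofs are below) =====
def Claim_equal_parse_chat_ids_py : Prop := ∀ (raw : String), Dom_parse_chat_ids_py raw → Spec_parse_chat_ids_py raw (parse_chat_ids_py raw)

-- ===== LEMMAS AND PROOFS =====

-- substitution performed by A's replace(';', ',')
def pvSub (c : Char) : Char := if c = ';' then ',' else c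

-- character-level split on ',' (the reference semantics of split(','))
def pvSplit1 : List Char → List (List Char)
  | [] => [[]]
  | c :: cs =>
    if c = ',' then [] :: pvSplit1 cs
    else
      match pvSplit1 cs with
      | [] => [[c]]
      | p :: ps => (c :: p) :: ps

def pvConsHead (pre : List Char) : List (List Char) → List (List Char)
  | [] => [pre]
  | p :: ps => (pre ++ p) :: ps

-- A's loop body and B's loop body, named for the proofs
def pvFoldA (st : List Int × PySem.Set Int) (part : List Char) : List Int × PySem.Set Int :=
  let part := PySem.Chars.strip part
  if part = [] then st
  else
    match PySem.Int.ofChars? part with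
    | none => st
    | some value =>
      if PySem.Set.contains st.2 value then st
      else (st.1 ++ [value], PySem.Set.add st.2 value)

def pvStepB (st : List Int × List Char) (ch : Char) : List Int × List Char :=
  if ch = ',' ∨ ch = ';' then (pvFlush st.2 st.1, []) else (st.1, st.2 ++ [ch])

lemma pvSplit1_ne_nil (cs : List Char) : pvSplit1 cs ≠ [] := by
  cases cs with
  | nil => simp [pvSplit1]
  | cons c cs =>
    unfold pvSplit1
    by_cases h : c = ','
    · simp [h]
    · simp only [h, if_false]
      cases pvSplit1 cs <;> simp

lemma pvSplit1_cons (c : Char) (cs : List Char) :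
    pvSplit1 (c :: cs) =
      if c = ',' then [] :: pvSplit1 cs else pvConsHead [c] (pvSplit1 cs) := by
  rw [pvSplit1]
  split_ifs with h
  · rfl
  · cases pvSplit1 cs <;> rfl

lemma replace_go_eq (l acc : List Char) (fuel : ℕ) (h : l.length ≤ fuel) :
    PySem.Chars.replace.go [';'] [','] fuel l acc = acc.reverse ++ l.map pvSub := by
  induction l generalizing fuel acc with
  | nil => cases fuel <;> simp [PySem.Chars.replace.go]
  | cons c t ih =>
    cases fuel with
    | zero => simp at h
    | succ f =>
      have hf : t.length ≤ f := by simpa using h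
      by_cases hc : c = ';'
      · have hp : [';'].isPrefixOf (c :: t) = true := by simp [hc, List.isPrefixOf]
        rw [PySem.Chars.replace.go, hp]
        simp only [if_true]
        rw [show List.drop [';'].length (c :: t) = t from rfl, ih _ _ hf]
        simp [hc, pvSub]
      · have hp : [';'].isPrefixOf (c :: t) = false := by
          simp [List.isPrefixOf]
          exact fun h' => hc h'.symm
        rw [PySem.Chars.replace.go, hp]
        simp only [Bool.false_eq_true, if_false]
        rw [ih _ _ hf]
        simp [pvSub, hc]

lemma replace_eq (s : List Char) :
    PySem.Chars.replace s [';'] [','] = s.map pvSub := by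
  unfold PySem.Chars.replace
  simpa using replace_go_eq s [] s.length le_rfl

lemma splitOn_go_eq (l cur : List Char) (acc : List (List Char)) (fuel : ℕ)
    (h : l.length ≤ fuel) :
    PySem.Chars.splitOn.go [','] fuel l cur acc =
      acc.reverse ++ pvConsHead cur.reverse (pvSplit1 l) := by
  induction l generalizing fuel cur acc with
  | nil => cases fuel <;> simp [PySem.Chars.splitOn.go, pvSplit1, pvConsHead]
  | cons c rest ih =>
    cases fuel with
    | zero => simp at h
    | succ f =>
      have hf : rest.length ≤ f := by simpa using h
      by_cases hc : c = ','
      · have hp : [','].isPrefixOf (c :: rest) = true := by simp [hc, List.isPrefixOf]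
        rw [PySem.Chars.splitOn.go, hp]
        simp only [if_true]
        rw [show List.drop [','].length (c :: rest) = rest from rfl, ih _ _ _ hf]
        rw [pvSplit1_cons]
        rcases hs : pvSplit1 rest with _ | ⟨p, ps⟩
        · exact absurd hs (pvSplit1_ne_nil rest)
        · simp [hc, pvConsHead]
      · have hp : [','].isPrefixOf (c :: rest) = false := by
          simp [List.isPrefixOf]
          exact fun h' => hc h'.symm
        rw [PySem.Chars.splitOn.go, hp]
        simp only [Bool.false_eq_true, if_false]
        rw [ih _ _ _ hf, pvSplit1_cons]
        rcases hs : pvSplit1 rest with _ | ⟨p, ps⟩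
        · exact absurd hs (pvSplit1_ne_nil rest)
        · simp [hc, pvConsHead]

lemma splitOn_eq (s : List Char) :
    PySem.Chars.splitOn s [','] = pvSplit1 s := by
  unfold PySem.Chars.splitOn
  rw [splitOn_go_eq s [] [] (s.length + 1) (Nat.le_succ _)]
  rcases hs : pvSplit1 s with _ | ⟨p, ps⟩
  · exact absurd hs (pvSplit1_ne_nil s)
  · simp [pvConsHead]

-- A's loop body on a diagonal state is B's flush, on both components
lemma pvFoldA_diag (s : List Int) (part : List Char) :
    pvFoldA (s, s) part = (pvFlush part s, pvFlush part s) := by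
  unfold pvFoldA pvFlush
  by_cases h : PySem.Chars.strip part = []
  · simp [h]
  · cases hp : PySem.Int.ofChars? (PySem.Chars.strip part) with
    | none => simp [h, hp]
    | some v =>
      simp only [h, hp, if_false]
      by_cases hm : v ∈ s <;> simp [PySem.Set.add, hm]

lemma aFold_eq (parts : List (List Char)) (s : List Int) :
    parts.foldl pvFoldA (s, s) =
      (parts.foldl (fun o p => pvFlush p o) s, parts.foldl (fun o p => pvFlush p o) s) := by
  induction parts generalizing s with
  | nil => simp
  | cons hd tl ih => rw [List.foldl_cons, pvFoldA_diag, List.foldl_cons]; exact ih _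

-- B's sentinel scan over cs computes the flush-fold over the comma split of cs.map pvSub
lemma scanB_eq (cs : List Char) (buf : List Char) (out : List Int) :
    ((cs ++ [',']).foldl pvStepB (out, buf)).1 =
      (pvConsHead buf (pvSplit1 (cs.map pvSub))).foldl (fun o p => pvFlush p o) out := by
  induction cs generalizing buf out with
  | nil => simp [pvStepB, pvSplit1, pvConsHead]
  | cons c cs ih =>
    by_cases hc : c = ',' ∨ c = ';'
    · have hsub : pvSub c = ',' := by rcases hc with h | h <;> simp [pvSub, h]
      simp only [List.cons_append, List.foldl_cons, pvStepB, hc, if_true]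
      rw [ih]
      simp only [List.map_cons, hsub]
      rw [pvSplit1_cons]
      rcases hs : pvSplit1 (cs.map pvSub) with _ | ⟨p, ps⟩
      · exact absurd hs (pvSplit1_ne_nil _)
      · simp [pvConsHead]
    · have hnc : ¬ c = ',' := fun h => hc (Or.inl h)
      have hns : ¬ c = ';' := fun h => hc (Or.inr h)
      have hsub : pvSub c = c := by simp [pvSub, hns]
      simp only [List.cons_append, List.foldl_cons, pvStepB, hc, if_false]
      rw [ih]
      simp only [List.map_cons, hsub]
      rw [pvSplit1_cons]
      rcases hs : pvSplit1 (cs.map pvSub) with _ | ⟨p, ps⟩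
      · exact absurd hs (pvSplit1_ne_nil _)
      · simp [hnc, pvConsHead]

-- ===== VERDICT (by name: the statement is the Claim_ definition above) =====
theorem parse_chat_ids_py_spec : Claim_equal_parse_chat_ids_py := by
  intro raw _
  show parse_chat_ids_py raw = parse_chat_ids_py_alt raw
  show ((PySem.Chars.splitOn (PySem.Chars.replace raw.toList [';'] [',']) [',']).foldl pvFoldA
          ([], PySem.Set.empty)).1 =
       ((raw.toList ++ [',']).foldl pvStepB ([], [])).1
  rw [replace_eq, splitOn_eq, scanB_eq]
  have he : (PySem.Set.empty : PySem.Set Int) = ([] : List Int) := rfl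
  rw [he, aFold_eq]
  rcases hs : pvSplit1 (raw.toList.map pvSub) with _ | ⟨p, ps⟩
  · exact absurd hs (pvSplit1_ne_nil _)
  · simp [pvConsHead]
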